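-- pv_equiv track=rewrite | github.com/NormanLbc/Analyse_Statistique_Loto | filters.py | heuristic_2sur5
-- ===== SOURCE A (Python) =====
-- def heuristic_2sur5(combos):
--     combos_sorted= sorted(combos)
--     coverage=[]
--     temp= combos_sorted[0]
--     for c in combos_sorted[1:]:
--         if len(set(temp).intersection(c))>=2:
--             if c<temp:
--                 temp= c
--         else:
--             coverage.append(temp)
--             temp= c
--     coverage.append(temp)
--     return coverage
-- ===== SOURCE B (Python) =====
-- def heuristic_2sur5(combos):
--     # dropwhile-style grouping: peel off the leading group of each remaining suffix
--     cs = sorted(combos)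
--     coverage = []
--     while cs:
--         rep = cs[0]
--         rep_set = set(rep)
--         rest = cs[1:]
--         while rest and len(rep_set.intersection(rest[0])) >= 2:
--             rest = rest[1:]
--         coverage.append(rep)
--         cs = rest
--     return coverage
-- ===== Notes on version B (the rewrite author's own statement) =====
-- stated objective: simpler
-- what changed: Replaces A's single-pass accumulator with per-comparison branching (and its dead 'if c<temp' re-minimisation branch, unreachable after sorting) by a dropwhile-style decomposition: repeatedly take the head of the remaining sorted suffix as the group representative, drop the following combos that share >=2 elements with it, and recurse on the rest; the empty-input IndexError of A becomes a natural empty result in B.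
import Mathlib
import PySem

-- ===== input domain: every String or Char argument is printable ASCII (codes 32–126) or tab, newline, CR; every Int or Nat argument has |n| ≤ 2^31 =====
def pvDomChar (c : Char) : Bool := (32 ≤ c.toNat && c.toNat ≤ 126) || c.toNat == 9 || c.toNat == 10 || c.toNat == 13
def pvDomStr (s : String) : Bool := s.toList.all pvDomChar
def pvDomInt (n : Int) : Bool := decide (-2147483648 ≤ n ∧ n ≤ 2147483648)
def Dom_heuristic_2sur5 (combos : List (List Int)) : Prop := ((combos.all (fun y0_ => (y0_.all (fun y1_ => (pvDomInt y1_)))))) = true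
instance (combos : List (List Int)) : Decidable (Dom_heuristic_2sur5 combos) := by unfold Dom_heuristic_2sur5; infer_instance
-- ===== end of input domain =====

-- B replaces A's single-pass accumulator (with its unreachable 'c < temp' re-minimisation
-- branch) by a dropwhile-style grouping of the sorted list; A raises IndexError on the empty
-- list (excluded by Pre_), where B naturally returns [].


-- len(set(t).intersection(c)) >= 2 : number of distinct elements of t that occur in c
def pvInter2 (t c : List Int) : Bool :=
  decide (2 ≤ (PySem.Set.ofList t).countP (fun x => c.contains x))

-- ===== PORT A =====
-- A's for-loop over combos_sorted[1:] with state (coverage, temp)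
def pvLoopA (cov : List (List Int)) (temp : List Int) : List (List Int) → List (List Int)
  | [] => cov ++ [temp]
  | c :: rest =>
    if pvInter2 temp c then
      if c < temp then pvLoopA cov c rest else pvLoopA cov temp rest
    else pvLoopA (cov ++ [temp]) c rest

def heuristic_2sur5 (combos : List (List Int)) : List (List Int) :=
  match PySem.List.sorted combos (fun x => x) false with
  | [] => []   -- combos_sorted[0] raises IndexError here; excluded by Pre_
  | temp :: rest => pvLoopA [] temp rest

-- ===== PORT B =====
-- inner while: drop the combos sharing >= 2 elements with the representative
def pvDropGroup (rep : List Int) : List (List Int) → List (List Int)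
  | [] => []
  | c :: rest => if pvInter2 rep c then pvDropGroup rep rest else c :: rest

theorem pvDropGroup_length_le (rep : List Int) (l : List (List Int)) :
    (pvDropGroup rep l).length ≤ l.length := by
  induction l with
  | nil => simp [pvDropGroup]
  | cons c rest ih =>
    simp only [pvDropGroup]
    split
    · exact Nat.le_succ_of_le ih
    · simp

-- outer while over the remaining sorted suffix
def pvGroupB (cs : List (List Int)) : List (List Int) :=
  match cs with
  | [] => []
  | rep :: rest => rep :: pvGroupB (pvDropGroup rep rest)
termination_by cs.length
decreasing_by
  simpa using Nat.lt_succ_of_le (pvDropGroup_length_le rep rest)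

def heuristic_2sur5_alt (combos : List (List Int)) : List (List Int) :=
  pvGroupB (PySem.List.sorted combos (fun x => x) false)

-- ===== PRECONDITION & SPEC =====
-- Pre_ excludes only the empty list, on which A raises IndexError (combos_sorted[0]).
def Pre_heuristic_2sur5 (combos : List (List Int)) : Prop := combos ≠ []
instance (combos : List (List Int)) : Decidable (Pre_heuristic_2sur5 combos) := by unfold Pre_heuristic_2sur5; infer_instance
def pvWitness_heuristic_2sur5 : List (List Int) := [[1, 2, 3], [1, 2, 4], [7, 8, 9]]

def Spec_heuristic_2sur5 (combos : List (List Int)) (out : List (List Int)) : Prop := out = heuristic_2sur5_alt combos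
instance (combos : List (List Int)) (out : List (List Int)) : Decidable (Spec_heuristic_2sur5 combos out) := by unfold Spec_heuristic_2sur5; infer_instance

-- ===== CLAIM (what is proved, stated in full; the proofs are below) =====
def Claim_equal_heuristic_2sur5 : Prop := ∀ (combos : List (List Int)), Dom_heuristic_2sur5 combos → Pre_heuristic_2sur5 combos → Spec_heuristic_2sur5 combos (heuristic_2sur5 combos)

-- ===== LEMMAS AND PROOFS =====

-- On a sorted suffix (temp ≤ every later element), A's loop produces exactly
-- B's head-plus-dropwhile grouping, appended to the accumulator.
theorem pvLoopA_eq_groupB (l : List (List Int)) :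
    ∀ temp cov, (temp :: l).Pairwise (· ≤ ·) →
      pvLoopA cov temp l = cov ++ temp :: pvGroupB (pvDropGroup temp l) := by
  induction l with
  | nil => intro temp cov _; simp [pvLoopA, pvDropGroup, pvGroupB]
  | cons c rest ih =>
    intro temp cov hp
    have htc : temp ≤ c := (List.pairwise_cons.mp hp).1 c (by simp)
    have hrest : (c :: rest).Pairwise (· ≤ ·) := (List.pairwise_cons.mp hp).2
    have htrest : (temp :: rest).Pairwise (· ≤ ·) := by
      refine List.pairwise_cons.mpr ⟨?_, (List.pairwise_cons.mp hrest).2⟩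
      intro a ha
      exact le_trans htc ((List.pairwise_cons.mp hrest).1 a ha)
    by_cases h : pvInter2 temp c = true
    · have hnlt : ¬ c < temp := not_lt_of_ge htc
      simp only [pvLoopA, h, if_true, if_neg hnlt, pvDropGroup]
      exact ih temp cov htrest
    · simp only [pvLoopA, h, pvDropGroup]
      rw [ih c (cov ++ [temp]) hrest]
      simp [pvGroupB]

-- the ports elaborate 'sorted' with core's List.instLT; the order lemmas use Mathlib's
-- LinearOrder instances — the two are propositionally identical, bridged by congr
theorem pvSortedInst (xs : List (List Int)) :
    (@PySem.List.sorted (List Int) (List Int) List.instLT (fun a b => a.decidableLT b) xs (fun x => x) false)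
  = (@PySem.List.sorted (List Int) (List Int) List.instLinearOrder.toLT LinearOrder.toDecidableLT xs (fun x => x) false) := by
  congr 1

theorem sorted_id_pairwise (xs : List (List Int)) :
    ((@PySem.List.sorted (List Int) (List Int) List.instLinearOrder.toLT LinearOrder.toDecidableLT xs (fun x => x) false)).Pairwise (· ≤ ·) :=
  PySem.List.sorted_pairwise xs (fun x => x)

-- ===== VERDICT (by name: the statement is the Claim_ definition above) =====
theorem heuristic_2sur5_spec : Claim_equal_heuristic_2sur5 := by
  intro combos _ hpre
  unfold Spec_heuristic_2sur5 heuristic_2sur5 heuristic_2sur5_alt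
  rw [pvSortedInst combos]
  cases hcs : (@PySem.List.sorted (List Int) (List Int) List.instLinearOrder.toLT LinearOrder.toDecidableLT combos (fun x => x) false) with
  | nil => exact absurd ((@PySem.List.sorted_eq_nil_iff (List Int) (List Int) List.instLinearOrder.toLT LinearOrder.toDecidableLT combos (fun x => x) false).mp hcs) hpre
  | cons temp rest =>
    have hp := sorted_id_pairwise combos
    rw [hcs] at hp
    show pvLoopA [] temp rest = pvGroupB (temp :: rest)
    rw [pvLoopA_eq_groupB rest temp [] hp]
    simp [pvGroupB]
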